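-- pv_equiv track=rewrite | github.com/ydb-platform/ydb | contrib/python/posthog/posthog/exception_utils.py | _module_in_list
-- ===== SOURCE A (Python) =====
-- def _module_in_list(name, items):
--     # type: (str | None, Optional[List[str]]) -> bool
--     if name is None:
--         return False
--
--     if not items:
--         return False
--
--     for item in items:
--         if item == name or name.startswith(item + "."):
--             return True
--
--     return False
-- ===== SOURCE B (Python) =====
-- def _module_in_list(name, items):
--     # Different decomposition: instead of scanning items with startswith, build a
--     # set of items once and walk name's own dotted-ancestor prefixes against it.
--     if name is None:
--         return False
--     if not items:
--         return False
--     s = set(items)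
--     if name in s:
--         return True
--     for i, ch in enumerate(name):
--         if ch == '.' and name[:i] in s:
--             return True
--     return False
-- ===== Notes on version B (the rewrite author's own statement) =====
-- stated objective: alternative
-- what changed: Inverts the traversal: instead of scanning items and testing name.startswith(item + '.'), B builds a set of items once and enumerates name's dotted-ancestor prefixes (name itself and name[:i] at every '.'), testing set membership.
import Mathlib
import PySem

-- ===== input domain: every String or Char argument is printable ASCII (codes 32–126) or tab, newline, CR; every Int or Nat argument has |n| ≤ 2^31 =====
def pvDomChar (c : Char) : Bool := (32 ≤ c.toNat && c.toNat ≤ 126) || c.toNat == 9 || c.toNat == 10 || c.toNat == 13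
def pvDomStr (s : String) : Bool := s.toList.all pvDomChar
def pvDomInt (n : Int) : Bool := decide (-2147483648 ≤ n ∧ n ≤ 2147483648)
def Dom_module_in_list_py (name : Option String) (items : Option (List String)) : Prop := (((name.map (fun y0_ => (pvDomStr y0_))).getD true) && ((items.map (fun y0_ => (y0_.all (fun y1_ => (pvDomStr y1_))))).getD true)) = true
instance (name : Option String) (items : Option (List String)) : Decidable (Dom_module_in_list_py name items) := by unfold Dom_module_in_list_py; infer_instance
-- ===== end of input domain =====

-- B inverts the traversal (alternative decomposition): it builds a set of items once and walks name's dotted-ancestor prefixes against it, instead of scanning items with startswith.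


-- ===== PORT A =====
-- A scans items, testing item == name or name.startswith(item + ".").
def pvAloop (n : List Char) (its : List String) : Bool :=
  match its with
  | [] => false
  | item :: rest =>
    if item.toList == n || PySem.Chars.startswith n (item.toList ++ ['.']) then true
    else pvAloop n rest

def module_in_list_py (name : Option String) (items : Option (List String)) : Bool :=
  match name with
  | none => false
  | some n =>
    match items with
    | none => false
    | some its => if its = [] then false else pvAloop n.toList its

-- ===== PORT B =====
-- B builds a set of items once, then walks name's own dotted-ancestor prefixes.
def module_in_list_py_alt (name : Option String) (items : Option (List String)) : Bool :=
  match name with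
  | none => false
  | some n =>
    match items with
    | none => false
    | some its =>
      if its = [] then false
      else
        let s : PySem.Set (List Char) := PySem.Set.ofList (its.map String.toList)
        if PySem.Set.contains s n.toList then true
        else
          (PySem.List.enumerate n.toList).any
            (fun p => p.2 == '.' && PySem.Set.contains s (PySem.List.slice n.toList none (some p.1)))

-- ===== PRECONDITION & SPEC =====
def Spec_module_in_list_py (name : Option String) (items : Option (List String)) (out : Bool) : Prop := out = module_in_list_py_alt name items
instance (name : Option String) (items : Option (List String)) (out : Bool) : Decidable (Spec_module_in_list_py name items out) := by unfold Spec_module_in_list_py; infer_instance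

-- ===== CLAIM (what is proved, stated in full; the proofs are below) =====
def Claim_equal_module_in_list_py : Prop := ∀ (name : Option String) (items : Option (List String)), Dom_module_in_list_py name items → Spec_module_in_list_py name items (module_in_list_py name items)

-- ===== LEMMAS AND PROOFS =====

lemma pvPrefix_dot_iff (p n : List Char) :
    (p ++ ['.']) <+: n ↔ ∃ k, ∃ _ : k < n.length, n[k] = '.' ∧ n.take k = p := by
  constructor
  · rintro ⟨t, ht⟩
    subst ht
    refine ⟨p.length, by simp, ?_, ?_⟩
    · simp
    · simp
  · rintro ⟨k, hk, hdot, htake⟩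
    refine ⟨n.drop (k + 1), ?_⟩
    have h1 : n.take k ++ n.drop k = n := List.take_append_drop k n
    have h2 : n.drop k = n[k] :: n.drop (k + 1) := List.drop_eq_getElem_cons hk
    calc p ++ ['.'] ++ n.drop (k + 1) = n.take k ++ ('.' :: n.drop (k + 1)) := by
            rw [htake]; simp
    _ = n.take k ++ n.drop k := by rw [h2, hdot]
    _ = n := h1

lemma pvAloop_iff (n : List Char) (its : List String) :
    pvAloop n its = true ↔
      ∃ item ∈ its, item.toList = n ∨ (item.toList ++ ['.']) <+: n := by
  induction its with
  | nil => simp [pvAloop]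
  | cons item rest ih =>
    simp only [pvAloop]
    split
    · rename_i h
      simp only [Bool.or_eq_true, beq_iff_eq, PySem.Chars.startswith_iff] at h
      simp only [true_iff]
      exact ⟨item, List.mem_cons_self, h⟩
    · rename_i h
      simp only [Bool.or_eq_true, beq_iff_eq, PySem.Chars.startswith_iff, not_or] at h
      rw [ih]
      constructor
      · rintro ⟨x, hx, hmatch⟩
        exact ⟨x, List.mem_cons_of_mem _ hx, hmatch⟩
      · rintro ⟨x, hx, hmatch⟩
        rcases List.mem_cons.mp hx with rfl | hx'
        · rcases hmatch with h1 | h2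
          · exact absurd h1 h.1
          · exact absurd h2 (by simpa using h.2)
        · exact ⟨x, hx', hmatch⟩

lemma pvBscan_iff (n : List Char) (s : PySem.Set (List Char)) :
    ((PySem.List.enumerate n).any
        (fun p => p.2 == '.' && PySem.Set.contains s (PySem.List.slice n none (some p.1))) = true)
      ↔ ∃ k, ∃ _ : k < n.length, n[k] = '.' ∧ n.take k ∈ s := by
  rw [List.any_eq_true]
  constructor
  · rintro ⟨p, hp, hcond⟩
    rcases (PySem.List.mem_enumerate_iff _ _ _).mp hp with ⟨k, hk, rfl⟩
    simp only [Bool.and_eq_true, beq_iff_eq] at hcond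
    refine ⟨k, hk, hcond.1, ?_⟩
    have := hcond.2
    rw [show ((0 : Int) + k) = ((k : Nat) : Int) by omega] at this
    rw [PySem.List.slice_to_natCast] at this
    exact (PySem.Set.contains_iff _ _).mp this
  · rintro ⟨k, hk, hdot, hmem⟩
    refine ⟨((0 : Int) + k, n[k]), (PySem.List.mem_enumerate_iff _ _ _).mpr ⟨k, hk, rfl⟩, ?_⟩
    simp only [Bool.and_eq_true, beq_iff_eq]
    refine ⟨hdot, ?_⟩
    rw [show ((0 : Int) + k) = ((k : Nat) : Int) by omega, PySem.List.slice_to_natCast]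
    exact (PySem.Set.contains_iff _ _).mpr hmem

-- ===== VERDICT (by name: the statement is the Claim_ definition above) =====
theorem module_in_list_py_spec : Claim_equal_module_in_list_py := by
  intro name items _
  unfold Spec_module_in_list_py module_in_list_py module_in_list_py_alt
  cases name with
  | none => rfl
  | some n =>
    cases items with
    | none => rfl
    | some its =>
      by_cases h : its = []
      · simp [h]
      · simp only [if_neg h]
        have hmem : ∀ x : List Char,
            x ∈ PySem.Set.ofList (its.map String.toList) ↔ ∃ item ∈ its, item.toList = x := by
          intro x
          rw [PySem.Set.mem_ofList]
          simp [List.mem_map, eq_comm]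
        by_cases hc : PySem.Set.contains (PySem.Set.ofList (its.map String.toList)) n.toList = true
        · rw [if_pos hc]
          rcases (hmem _).mp ((PySem.Set.contains_iff _ _).mp hc) with ⟨item, hi, he⟩
          exact (pvAloop_iff _ _).mpr ⟨item, hi, Or.inl he⟩
        · rw [if_neg hc]
          have hnotin : ¬ ∃ item ∈ its, item.toList = n.toList := by
            intro hx
            exact hc ((PySem.Set.contains_iff _ _).mpr ((hmem _).mpr hx))
          rw [Bool.eq_iff_iff, pvAloop_iff, pvBscan_iff]
          constructor
          · rintro ⟨item, hi, he | hp⟩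
            · exact absurd ⟨item, hi, he⟩ hnotin
            · rcases (pvPrefix_dot_iff _ _).mp hp with ⟨k, hk, hdot, htake⟩
              exact ⟨k, hk, hdot, (hmem _).mpr ⟨item, hi, htake.symm⟩⟩
          · rintro ⟨k, hk, hdot, hs⟩
            rcases (hmem _).mp hs with ⟨item, hi, he⟩
            exact ⟨item, hi, Or.inr ((pvPrefix_dot_iff _ _).mpr ⟨k, hk, hdot, he.symm⟩)⟩
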